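-- pv_equiv track=rewrite | github.com/Michaelhuazhang/code_offer | 左传云算法刷题/高频算法刷题/四/problem_04_MaxABSBetweenLeftAndRight.py | maxAbs1
-- ===== SOURCE A (Python) =====
-- def maxAbs1(array):
-- 	if not array or len(array) < 2:
-- 		return 0
-- 	la = [0 for i in array]
-- 	ra = [0 for i in array]
-- 	la[0] = array[0]
-- 	ra[len(array)-1] = array[-1]
-- 	for i in range(1, len(array)):
-- 		la[i] = max(la[i-1], array[i])
-- 	for j in range(len(array)-2, -1, -1):
-- 		ra[j] = max(ra[j+1], array[j])
-- 	maxabs = 0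
-- 	for i in range(len(array)-1):
-- 		maxabs = max(maxabs, abs(la[i]-ra[i+1]))
-- 	return maxabs
-- ===== SOURCE B (Python) =====
-- def maxAbs1(array):
-- 	if len(array) < 2:
-- 		return 0
-- 	return max(array) - min(array[0], array[-1])
-- ===== Notes on version B (the rewrite author's own statement) =====
-- stated objective: faster
-- what changed: Replaces the two prefix/suffix-max arrays and the final split scan with the closed form 'max of the list minus the smaller of its first and last element', computed in one pass with O(1) extra space.
import Mathlib
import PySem

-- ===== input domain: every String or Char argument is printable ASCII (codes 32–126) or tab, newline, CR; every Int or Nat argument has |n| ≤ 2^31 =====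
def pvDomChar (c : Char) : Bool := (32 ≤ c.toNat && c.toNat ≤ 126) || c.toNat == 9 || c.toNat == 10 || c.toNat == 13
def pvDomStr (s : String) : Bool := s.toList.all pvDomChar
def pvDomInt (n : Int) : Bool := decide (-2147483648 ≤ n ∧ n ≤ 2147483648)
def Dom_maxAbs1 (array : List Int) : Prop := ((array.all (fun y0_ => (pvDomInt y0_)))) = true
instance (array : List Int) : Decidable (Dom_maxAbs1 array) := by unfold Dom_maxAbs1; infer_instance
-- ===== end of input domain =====

-- B replaces A's two prefix/suffix-max arrays and split scan by the closed form
-- 'max of the list minus the smaller of its first and last element': one pass, O(1) extra space (objective: faster).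

-- ===== PORT A =====
def maxAbs1 (array : List Int) : Int :=
  if array = [] ∨ array.length < 2 then 0
  else
    let n := array.length
    let la0 := (array.map (fun _ => (0 : Int))).set 0 (array.getD 0 0)
    let ra0 := (array.map (fun _ => (0 : Int))).set (n - 1) (array.getD (n - 1) 0)
    let la := (List.range' 1 (n - 1)).foldl
      (fun l i => l.set i (max (l.getD (i - 1) 0) (array.getD i 0))) la0
    let ra := ((List.range (n - 1)).reverse).foldl
      (fun r j => r.set j (max (r.getD (j + 1) 0) (array.getD j 0))) ra0
    (List.range (n - 1)).foldl
      (fun maxabs i => max maxabs |la.getD i 0 - ra.getD (i + 1) 0|) 0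

-- ===== PORT B =====
def maxAbs1_alt (array : List Int) : Int :=
  if array.length < 2 then 0
  else
    (match PySem.List.max? array (fun y => y) with
     | some m => m
     | none => 0)
    - min (array.getD 0 0) (array.getD (array.length - 1) 0)

-- ===== PRECONDITION & SPEC =====
def Spec_maxAbs1 (array : List Int) (out : Int) : Prop := out = maxAbs1_alt array
instance (array : List Int) (out : Int) : Decidable (Spec_maxAbs1 array out) := by unfold Spec_maxAbs1; infer_instance

-- ===== CLAIM (what is proved, stated in full; the proofs are below) =====
def Claim_equal_maxAbs1 : Prop := ∀ (array : List Int), Dom_maxAbs1 array → Spec_maxAbs1 array (maxAbs1 array)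

-- ===== LEMMAS AND PROOFS =====

/-- prefix maximum: `pvPm a i` = max of `a[0..i]`. -/
def pvPm (a : List Int) : Nat → Int
  | 0 => a.getD 0 0
  | i + 1 => max (pvPm a i) (a.getD (i + 1) 0)

/-- suffix max counted from the end: `pvSmA a k` = max of the last `k+1` elements. -/
def pvSmA (a : List Int) : Nat → Int
  | 0 => a.getD (a.length - 1) 0
  | k + 1 => max (pvSmA a k) (a.getD (a.length - 1 - (k + 1)) 0)

/-- suffix maximum: `pvSm a j` = max of `a[j..n-1]`. -/
def pvSm (a : List Int) (j : Nat) : Int := pvSmA a (a.length - 1 - j)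

lemma pvSm_last (a : List Int) : pvSm a (a.length - 1) = a.getD (a.length - 1) 0 := by
  simp [pvSm, pvSmA]

lemma pvSm_rec (a : List Int) (j : Nat) (hj : j < a.length - 1) :
    pvSm a j = max (pvSm a (j + 1)) (a.getD j 0) := by
  have h : a.length - 1 - j = (a.length - 2 - j) + 1 := by omega
  have h2 : a.length - 1 - (j + 1) = a.length - 2 - j := by omega
  have h3 : a.length - 1 - ((a.length - 2 - j) + 1) = j := by omega
  rw [pvSm, h, pvSmA, h3, pvSm, h2]

lemma pvPm_ge0 (a : List Int) (i : Nat) : a.getD 0 0 ≤ pvPm a i := by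
  induction i with
  | zero => simp [pvPm]
  | succ i ih => exact le_trans ih (le_max_left _ _)

lemma pvSmA_geLast (a : List Int) (k : Nat) : a.getD (a.length - 1) 0 ≤ pvSmA a k := by
  induction k with
  | zero => simp [pvSmA]
  | succ k ih => exact le_trans ih (le_max_left _ _)

lemma pvSm_geLast (a : List Int) (j : Nat) : a.getD (a.length - 1) 0 ≤ pvSm a j :=
  pvSmA_geLast a _

lemma pvPmSm (a : List Int) : ∀ (d i : Nat), i + d + 2 = a.length →
    max (pvPm a i) (pvSm a (i + 1)) = pvPm a (a.length - 1) := by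
  intro d
  induction d with
  | zero =>
      intro i hi
      have h1 : a.length - 1 = i + 1 := by omega
      have h2 : pvSm a (i + 1) = a.getD (i + 1) 0 := by
        rw [← h1, pvSm_last, h1]
      rw [h2, h1, pvPm]
  | succ d ih =>
      intro i hi
      have hj : i + 1 < a.length - 1 := by omega
      rw [pvSm_rec a (i + 1) hj, max_comm (pvSm a (i + 2)) _, ← max_assoc]
      have : max (pvPm a i) (a.getD (i + 1) 0) = pvPm a (i + 1) := rfl
      rw [this]
      exact ih (i + 1) (by omega)

lemma pvFoldMaxLe (f : Nat → Int) (T c : Int) (l : List Nat)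
    (hc : c ≤ T) (h : ∀ i ∈ l, f i ≤ T) :
    l.foldl (fun m i => max m (f i)) c ≤ T := by
  induction l generalizing c with
  | nil => simpa using hc
  | cons x xs ih =>
      simp only [List.foldl_cons]
      exact ih _ (max_le hc (h x (by simp))) (fun i hi => h i (by simp [hi]))

lemma pvGetD_set (l : List Int) (i j : Nat) (x : Int) :
    (l.set i x).getD j 0 = if i = j ∧ i < l.length then x else l.getD j 0 := by
  by_cases h : i = j ∧ i < l.length
  · obtain ⟨rfl, hl⟩ := h
    simp [List.getD_eq_getElem?_getD, hl]
  · rw [if_neg h]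
    by_cases hij : i = j
    · subst hij
      rw [List.set_eq_of_length_le (by by_contra hc; exact h ⟨rfl, by omega⟩)]
    · simp [List.getD_eq_getElem?_getD, hij]

lemma pvGetD_map0 (a : List Int) (t : Nat) : (a.map (fun _ => (0 : Int))).getD t 0 = 0 := by
  simp only [List.getD_eq_getElem?_getD, List.getElem?_map]
  cases a[t]? <;> simp

/-- the la loop invariant: after processing indices 1..k the list holds the prefix maxima
    at 0..k and the initial zeros elsewhere. -/
lemma pvLa_inv (a : List Int) (h2 : 2 ≤ a.length) :
    ∀ k, k ≤ a.length - 1 →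
      (((List.range' 1 k).foldl
          (fun l i => l.set i (max (l.getD (i - 1) 0) (a.getD i 0)))
          ((a.map (fun _ => (0 : Int))).set 0 (a.getD 0 0))).length = a.length)
      ∧ ∀ t, t < a.length →
          ((List.range' 1 k).foldl
            (fun l i => l.set i (max (l.getD (i - 1) 0) (a.getD i 0)))
            ((a.map (fun _ => (0 : Int))).set 0 (a.getD 0 0))).getD t 0
          = if t ≤ k then pvPm a t else 0 := by
  intro k
  induction k with
  | zero =>
      intro _
      refine ⟨by simp, ?_⟩
      intro t ht
      simp only [List.range', List.foldl_nil]
      rw [pvGetD_set]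
      by_cases h0 : t = 0
      · subst h0
        rw [if_pos ⟨rfl, by simp; omega⟩]
        simp [pvPm]
      · rw [if_neg (by intro hcon; exact h0 hcon.1.symm), if_neg (by omega), pvGetD_map0]
  | succ k ih =>
      intro hk
      obtain ⟨hlen, hget⟩ := ih (by omega)
      rw [List.range'_1_concat, List.foldl_append, List.foldl_cons, List.foldl_nil]
      have h1k : 1 + k = k + 1 := by omega
      rw [h1k]
      refine ⟨by simpa using hlen, ?_⟩
      intro t ht
      rw [pvGetD_set, hlen]
      have hv : pvPm a (k + 1) = max ((List.foldl (fun l i => l.set i (max (l.getD (i - 1) 0) (a.getD i 0)))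
          ((a.map fun _ => (0 : Int)).set 0 (a.getD 0 0)) (List.range' 1 k)).getD (k + 1 - 1) 0)
          (a.getD (k + 1) 0) := by
        have := hget k (by omega)
        rw [if_pos (le_refl k)] at this
        simp only [Nat.add_sub_cancel, this]
        rfl
      by_cases he : t = k + 1
      · subst he
        rw [if_pos ⟨rfl, by omega⟩, if_pos (le_refl _), hv]
      · rw [if_neg (by intro hcon; exact he hcon.1.symm), hget t ht]
        by_cases hle : t ≤ k
        · rw [if_pos hle, if_pos (by omega)]
        · rw [if_neg hle, if_neg (by omega)]

/-- the ra loop invariant, parametrised by the number k of processed indices (n-2 down to n-1-k). -/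
lemma pvRa_inv (a : List Int) (h2 : 2 ≤ a.length) :
    ∀ k, k ≤ a.length - 1 →
      (((List.range' (a.length - 1 - k) k).reverse.foldl
          (fun r j => r.set j (max (r.getD (j + 1) 0) (a.getD j 0)))
          ((a.map (fun _ => (0 : Int))).set (a.length - 1) (a.getD (a.length - 1) 0))).length = a.length)
      ∧ ∀ t, t < a.length →
          ((List.range' (a.length - 1 - k) k).reverse.foldl
            (fun r j => r.set j (max (r.getD (j + 1) 0) (a.getD j 0)))
            ((a.map (fun _ => (0 : Int))).set (a.length - 1) (a.getD (a.length - 1) 0))).getD t 0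
          = if a.length - 1 - k ≤ t then pvSm a t else 0 := by
  intro k
  induction k with
  | zero =>
      intro _
      refine ⟨by simp, ?_⟩
      intro t ht
      simp only [List.range', List.reverse_nil, List.foldl_nil]
      rw [pvGetD_set]
      by_cases h0 : t = a.length - 1
      · subst h0
        rw [if_pos ⟨rfl, by simp; omega⟩, if_pos (by omega), pvSm_last]
      · rw [if_neg (by intro hcon; exact h0 hcon.1.symm), if_neg (by omega), pvGetD_map0]
  | succ k ih =>
      intro hk
      obtain ⟨hlen, hget⟩ := ih (by omega)
      have hsplit : List.range' (a.length - 1 - (k + 1)) (k + 1)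
          = (a.length - 2 - k) :: List.range' (a.length - 1 - k) k := by
        have h1 : a.length - 1 - (k + 1) = a.length - 2 - k := by omega
        have h2 : a.length - 2 - k + 1 = a.length - 1 - k := by omega
        rw [h1, List.range'_succ, h2]
      rw [hsplit, List.reverse_cons, List.foldl_append, List.foldl_cons, List.foldl_nil]
      refine ⟨by simpa using hlen, ?_⟩
      intro t ht
      rw [pvGetD_set, hlen]
      have hv : pvSm a (a.length - 2 - k) = max ((List.foldl (fun r j => r.set j (max (r.getD (j + 1) 0) (a.getD j 0)))
          ((a.map fun _ => (0 : Int)).set (a.length - 1) (a.getD (a.length - 1) 0))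
          (List.range' (a.length - 1 - k) k).reverse).getD (a.length - 2 - k + 1) 0)
          (a.getD (a.length - 2 - k) 0) := by
        have h2 : a.length - 2 - k + 1 = a.length - 1 - k := by omega
        have := hget (a.length - 1 - k) (by omega)
        rw [if_pos (le_refl _)] at this
        rw [h2, this, pvSm_rec a (a.length - 2 - k) (by omega)]
        rw [h2]
      by_cases he : t = a.length - 2 - k
      · subst he
        rw [if_pos ⟨rfl, by omega⟩, if_pos (by omega), hv]
      · rw [if_neg (by intro hcon; exact he hcon.1.symm), hget t ht]
        by_cases hle : a.length - 1 - k ≤ t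
        · rw [if_pos hle, if_pos (by omega)]
        · rw [if_neg hle, if_neg (by omega)]

/-- the final scan evaluates to the closed form. -/
lemma pvFold3 (a : List Int) (h2 : 2 ≤ a.length) :
    (List.range (a.length - 1)).foldl (fun m i => max m |pvPm a i - pvSm a (i + 1)|) 0
    = pvPm a (a.length - 1) - min (a.getD 0 0) (a.getD (a.length - 1) 0) := by
  have habs : ∀ i, i < a.length - 1 →
      |pvPm a i - pvSm a (i + 1)|
      = pvPm a (a.length - 1) - min (pvPm a i) (pvSm a (i + 1)) := by
    intro i hi
    rw [← max_sub_min_eq_abs, max_comm, min_comm, pvPmSm a (a.length - 2 - i) i (by omega)]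
  have hminle : ∀ i, min (a.getD 0 0) (a.getD (a.length - 1) 0) ≤ min (pvPm a i) (pvSm a (i + 1)) :=
    fun i => le_min ((min_le_left _ _).trans (pvPm_ge0 a i)) ((min_le_right _ _).trans (pvSm_geLast a _))
  have hT0 : 0 ≤ pvPm a (a.length - 1) - min (a.getD 0 0) (a.getD (a.length - 1) 0) :=
    sub_nonneg.2 ((min_le_left _ _).trans (pvPm_ge0 a _))
  refine le_antisymm ?_ ?_
  · refine pvFoldMaxLe _ _ 0 _ hT0 ?_
    intro i hi
    rw [habs i (List.mem_range.1 hi)]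
    exact sub_le_sub_left (hminle i) _
  · by_cases hc : a.getD 0 0 ≤ a.getD (a.length - 1) 0
    · have h0m : (0 : Nat) ∈ List.range (a.length - 1) := List.mem_range.2 (by omega)
      have := (PySem.List.le_foldl_max_int (List.range (a.length - 1))
        (fun i => |pvPm a i - pvSm a (i + 1)|) 0).2 0 h0m
      refine le_trans (le_of_eq ?_) this
      rw [habs 0 (by omega)]
      have hs1 : a.getD 0 0 ≤ pvSm a 1 := hc.trans (pvSm_geLast a 1)
      rw [min_eq_left hc, min_eq_left (by simpa [pvPm] using hs1)]
      simp [pvPm]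
    · push_neg at hc
      have hm : (a.length - 2) ∈ List.range (a.length - 1) := List.mem_range.2 (by omega)
      have := (PySem.List.le_foldl_max_int (List.range (a.length - 1))
        (fun i => |pvPm a i - pvSm a (i + 1)|) 0).2 (a.length - 2) hm
      refine le_trans (le_of_eq ?_) this
      rw [habs (a.length - 2) (by omega)]
      have hlast : pvSm a (a.length - 2 + 1) = a.getD (a.length - 1) 0 := by
        rw [show a.length - 2 + 1 = a.length - 1 by omega, pvSm_last]
      have hpm : a.getD (a.length - 1) 0 ≤ pvPm a (a.length - 2) :=
        (hc.le).trans (pvPm_ge0 a _)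
      rw [min_eq_right hc.le, hlast, min_eq_right hpm]

lemma pvPm_foldl (x : Int) (t : List Int) :
    ∀ k, k ≤ t.length → pvPm (x :: t) k = (t.take k).foldl max x := by
  intro k
  induction k with
  | zero => simp [pvPm]
  | succ k ih =>
      intro hk
      have hk' : k < t.length := by omega
      rw [pvPm, ih (by omega)]
      have htake : t.take (k + 1) = t.take k ++ [t[k]] := by
        rw [List.take_add_one, List.getElem?_eq_getElem hk']; rfl
      rw [htake, List.foldl_append]
      simp [List.getD, List.getElem?_cons_succ, List.getElem?_eq_getElem hk']

-- ===== VERDICT (by name: the statement is the Claim_ definition above) =====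
theorem maxAbs1_spec : Claim_equal_maxAbs1 := by
  intro array _
  unfold Spec_maxAbs1 maxAbs1 maxAbs1_alt
  by_cases h2 : array.length < 2
  · rw [if_pos (Or.inr h2), if_pos h2]
  · push_neg at h2
    rw [if_neg (by rintro (rfl | h) <;> simp_all <;> omega), if_neg (by omega)]
    simp only [List.range_eq_range']
    have hla := (pvLa_inv array h2 (array.length - 1) (le_refl _)).2
    have hra := (pvRa_inv array h2 (array.length - 1) (le_refl _)).2
    have h0 : array.length - 1 - (array.length - 1) = 0 := by omega
    rw [h0] at hra
    refine Eq.trans (List.foldl_ext _ (fun m i => max m |pvPm array i - pvSm array (i + 1)|) 0 ?_) ?_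
    · intro acc i hi
      rw [List.mem_range'_1] at hi
      rw [hla i (by omega), hra (i + 1) (by omega), if_pos (by omega), if_pos (by omega)]
    · rw [← List.range_eq_range', pvFold3 array h2]
      cases array with
      | nil => simp at h2
      | cons x t =>
          rw [PySem.List.max?_id_cons]
          have hl : (x :: t).length - 1 = t.length := by simp
          rw [hl, pvPm_foldl x t t.length (le_refl _)]
          simp
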